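-- pv_equiv track=rewrite | github.com/erockpmz/musicscanner | springsteen_to_walkman.py | choose_best_release
-- ===== SOURCE A (Python) =====
-- from typing import Dict, Iterable, List, Optional, Sequence, Tuple
--
-- def choose_best_release(releases: List[dict], allowed_statuses: Sequence[str]) -> Optional[dict]:
--     if not releases:
--         return None
--     allowed = {x.casefold() for x in allowed_statuses}
--
--     def score(r: dict) -> Tuple[int, int, int, str]:
--         status = (r.get("status") or "").casefold()
--         disambig = 0 if r.get("disambiguation") else 1
--         packaging = (r.get("packaging") or "").casefold()
--         fmt_bonus = 1 if packaging in {"none", ""} else 0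
--         status_bonus = 10 if status in allowed else 0
--         date = r.get("date") or "9999-99-99"
--         return (status_bonus, disambig, fmt_bonus, date)
--
--         # earlier official / cleaner release wins
--
--     releases_sorted = sorted(releases, key=score)
--     # Prefer an allowed status first if any exist
--     for r in releases_sorted:
--         if (r.get("status") or "").casefold() in allowed:
--             return r
--     return releases_sorted[0]
-- ===== SOURCE B (Python) =====
-- def choose_best_release(releases, allowed_statuses):
--     # One selection pass with a unified key (allowed-first, then A's score tail);
--     # strict '<' replacement keeps the earliest element on ties, like A's stable sort.
--     allowed = {x.casefold() for x in allowed_statuses}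
--     best = None
--     best_key = None
--     for r in releases:
--         status = (r.get("status") or "").casefold()
--         packaging = (r.get("packaging") or "").casefold()
--         key = (0 if status in allowed else 1,
--                0 if r.get("disambiguation") else 1,
--                1 if packaging in ("none", "") else 0,
--                r.get("date") or "9999-99-99")
--         if best is None or key < best_key:
--             best, best_key = r, key
--     return best
-- ===== Notes on version B (the rewrite author's own statement) =====
-- stated objective: alternative
-- what changed: Replaces A's stable sort by tuple score plus a scan-for-allowed-with-fallback by one left-to-right pass keeping a single best accumulator under the unified key (allowed-first, then A's score tail), replacing only on strictly smaller key so the earliest element wins ties exactly as A's stable sort does.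
import Mathlib
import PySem

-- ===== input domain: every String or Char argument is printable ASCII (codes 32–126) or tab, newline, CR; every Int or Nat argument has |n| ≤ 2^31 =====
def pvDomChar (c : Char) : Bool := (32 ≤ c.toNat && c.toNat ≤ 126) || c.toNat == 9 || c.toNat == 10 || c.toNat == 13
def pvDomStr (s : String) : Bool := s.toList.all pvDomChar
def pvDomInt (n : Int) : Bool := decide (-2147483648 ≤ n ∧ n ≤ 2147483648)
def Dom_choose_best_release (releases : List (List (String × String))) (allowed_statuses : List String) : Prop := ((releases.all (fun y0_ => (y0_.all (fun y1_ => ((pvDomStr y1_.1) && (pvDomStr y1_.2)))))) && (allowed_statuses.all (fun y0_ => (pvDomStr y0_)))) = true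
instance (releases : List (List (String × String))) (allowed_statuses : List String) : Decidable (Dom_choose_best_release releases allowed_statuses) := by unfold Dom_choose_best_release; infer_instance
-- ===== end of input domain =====

-- B replaces A's stable sort-by-tuple-score + scan-for-allowed-with-fallback by a single
-- selection pass keeping one best accumulator under a unified key (alternative: no sort).


-- ===== PORT A =====
-- Python's '<' on 4-tuples (Int, Int, Int, String): lexicographic. Shared by both ports
-- (it is the comparison both Pythons delegate to the tuple type).
def pvTupLt (a b : Int × Int × Int × String) : Bool :=
  decide (a.1 < b.1) ||
    (a.1 == b.1 && (decide (a.2.1 < b.2.1) ||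
      (a.2.1 == b.2.1 && (decide (a.2.2.1 < b.2.2.1) ||
        (a.2.2.1 == b.2.2.1 && decide (a.2.2.2 < b.2.2.2))))))

-- r.get(k) or ""  (values are strings, so falsy exactly when missing or ""); shared helper.
def pvGetS (r : List (String × String)) (k : String) : String :=
  PySem.Dict.getD (PySem.Dict.mk r) k ""

-- A's local 'score'; .casefold() = PySem.Str.lower, exact on the ASCII domain.
def pvScore (allowed : PySem.Set String) (r : List (String × String)) : Int × Int × Int × String :=
  let status := PySem.Str.lower (pvGetS r "status")
  let disambig : Int := if pvGetS r "disambiguation" == "" then 1 else 0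
  let packaging := PySem.Str.lower (pvGetS r "packaging")
  let fmt_bonus : Int := if packaging == "none" || packaging == "" then 1 else 0
  let status_bonus : Int := if PySem.Set.contains allowed status then 10 else 0
  let date := if pvGetS r "date" == "" then "9999-99-99" else pvGetS r "date"
  (status_bonus, disambig, fmt_bonus, date)

def choose_best_release (releases : List (List (String × String))) (allowed_statuses : List String) : Option (List (String × String)) :=
  if releases = [] then none
  else
    let allowed : PySem.Set String := PySem.Set.ofList (allowed_statuses.map PySem.Str.lower)
    -- sorted(releases, key=score): PySem.List.sorted needs an LT instance on the key, which
    -- the 4-tuple key lacks; ported by hand as the SAME stable insertion fold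
    -- (cf. PySem.List.sorted_eq_foldl_insertBy) with Python's tuple '<' (pvTupLt) — exact.
    let releases_sorted := releases.foldl
      (fun acc r => PySem.List.insertBy (fun a b => pvTupLt (pvScore allowed a) (pvScore allowed b)) r acc) []
    match releases_sorted.find? (fun r => PySem.Set.contains allowed (PySem.Str.lower (pvGetS r "status"))) with
    | some r => some r
    | none => releases_sorted.head?   -- releases_sorted[0]; nonempty here, so head? = some _

-- ===== PORT B =====
-- B's unified key: (0 if status allowed else 1, A's score tail).
def pvKeyB (allowed : PySem.Set String) (r : List (String × String)) : Int × Int × Int × String :=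
  let status := PySem.Str.lower (pvGetS r "status")
  let packaging := PySem.Str.lower (pvGetS r "packaging")
  ((if PySem.Set.contains allowed status then (0 : Int) else 1),
   (if pvGetS r "disambiguation" == "" then (1 : Int) else 0),
   (if packaging == "none" || packaging == "" then (1 : Int) else 0),
   (if pvGetS r "date" == "" then "9999-99-99" else pvGetS r "date"))

def choose_best_release_alt (releases : List (List (String × String))) (allowed_statuses : List String) : Option (List (String × String)) :=
  let allowed : PySem.Set String := PySem.Set.ofList (allowed_statuses.map PySem.Str.lower)
  (releases.foldl
    (fun best r =>
      let k := pvKeyB allowed r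
      match best with
      | none => some (r, k)
      | some bp => if pvTupLt k bp.2 then some (r, k) else some bp)
    none).map Prod.fst

-- ===== PRECONDITION & SPEC =====
def Spec_choose_best_release (releases : List (List (String × String))) (allowed_statuses : List String) (out : Option (List (String × String))) : Prop := out = choose_best_release_alt releases allowed_statuses
instance (releases : List (List (String × String))) (allowed_statuses : List String) (out : Option (List (String × String))) : Decidable (Spec_choose_best_release releases allowed_statuses out) := by unfold Spec_choose_best_release; infer_instance

-- ===== CLAIM (what is proved, stated in full; the proofs are below) =====
def Claim_equal_choose_best_release : Prop := ∀ (releases : List (List (String × String))) (allowed_statuses : List String), Dom_choose_best_release releases allowed_statuses → Spec_choose_best_release releases allowed_statuses (choose_best_release releases allowed_statuses)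

-- ===== LEMMAS AND PROOFS =====

-- pvTupLt is the strict order of the lexicographic (linear) order on Int ×ₗ Int ×ₗ Int ×ₗ String.
def pvLex4 (a : Int × Int × Int × String) : Lex (Int × Lex (Int × Lex (Int × String))) :=
  toLex (a.1, toLex (a.2.1, toLex (a.2.2.1, a.2.2.2)))

theorem pvTupLt_iff (a b : Int × Int × Int × String) :
    pvTupLt a b = true ↔ pvLex4 a < pvLex4 b := by
  simp [pvTupLt, pvLex4, Prod.Lex.lt_iff]

theorem pvTupLt_false_iff (a b : Int × Int × Int × String) :
    pvTupLt a b = false ↔ ¬ pvLex4 a < pvLex4 b := by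
  rw [← pvTupLt_iff]; cases pvTupLt a b <;> simp

theorem pvTupLt_asymm {a b : Int × Int × Int × String} (h : pvTupLt a b = true) :
    pvTupLt b a = false := by
  rw [pvTupLt_false_iff]; exact lt_asymm ((pvTupLt_iff a b).mp h)

theorem pvTupLt_trans {a b c : Int × Int × Int × String}
    (h1 : pvTupLt a b = true) (h2 : pvTupLt b c = true) : pvTupLt a c = true := by
  rw [pvTupLt_iff]; exact lt_trans ((pvTupLt_iff a b).mp h1) ((pvTupLt_iff b c).mp h2)

theorem pvTupLt_compat {a b c : Int × Int × Int × String}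
    (h1 : pvTupLt a b = true) (h2 : pvTupLt c b = false) : pvTupLt a c = true := by
  rw [pvTupLt_iff]
  exact lt_of_lt_of_le ((pvTupLt_iff a b).mp h1) (not_lt.mp ((pvTupLt_false_iff c b).mp h2))

theorem pvTupLt_fst {a b : Int × Int × Int × String} (h : a.1 < b.1) : pvTupLt a b = true := by
  rw [pvTupLt_iff, pvLex4, pvLex4, Prod.Lex.lt_iff]; left; simpa using h

theorem pvTupLt_fst_ge {a b : Int × Int × Int × String} (h : b.1 < a.1) : pvTupLt a b = false := by
  rw [pvTupLt_false_iff, pvLex4, pvLex4, Prod.Lex.lt_iff]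
  simp only [ofLex_toLex, not_or, not_and]
  exact ⟨by omega, fun he => absurd he (by omega)⟩

theorem pvTupLt_fst_eq (c d : Int) (r s : Int × Int × String) :
    pvTupLt (c, r) (c, s) = pvTupLt (d, r) (d, s) := by
  simp [pvTupLt]

-- ---- generic facts about A's insertion fold ----

theorem pv_head?_insertBy {α : Type} (bef : α → α → Bool) (x : α) (M : List α) :
    (PySem.List.insertBy bef x M).head? =
      match M.head? with | none => some x | some y => some (if bef x y then x else y) := by
  cases M with
  | nil => simp [PySem.List.insertBy]
  | cons y ys => by_cases hxy : bef x y = true <;> simp [PySem.List.insertBy, hxy]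

theorem pv_find?_insertBy {α : Type} (bef : α → α → Bool) (p : α → Bool)
    (hcompat : ∀ a b c, bef a b = true → bef c b = false → bef a c = true) (x : α) :
    ∀ (M : List α), M.Pairwise (fun a b => bef b a = false) →
      (PySem.List.insertBy bef x M).find? p =
        if p x then (match M.find? p with | none => some x | some m => if bef x m then some x else some m)
        else M.find? p := by
  intro M
  induction M with
  | nil =>
    intro _; simp only [PySem.List.insertBy, List.find?]
    cases hpx : p x <;> simp [hpx]
  | cons y ys ih =>
    intro hpw
    rw [List.pairwise_cons] at hpw
    obtain ⟨hy, hys⟩ := hpw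
    simp only [PySem.List.insertBy]
    by_cases hxy : bef x y = true
    · rw [if_pos hxy]
      cases hpx : p x with
      | true =>
        rw [if_pos rfl, List.find?_cons_of_pos hpx]
        cases hf : (y :: ys).find? p with
        | none => rfl
        | some m =>
          have hmem := List.mem_of_find?_eq_some hf
          have hbxm : bef x m = true := by
            rcases List.mem_cons.mp hmem with h | h
            · exact h ▸ hxy
            · exact hcompat x y m hxy (hy m h)
          simp [hbxm]
      | false =>
        rw [if_neg (by simp), List.find?_cons_of_neg (by simp [hpx])]
    · rw [if_neg hxy]
      rw [Bool.not_eq_true] at hxy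
      cases hpy : p y with
      | true =>
        rw [List.find?_cons_of_pos hpy, List.find?_cons_of_pos hpy]
        cases hpx : p x with
        | true => rw [if_pos rfl]; simp [hxy]
        | false => rw [if_neg (by simp)]
      | false =>
        rw [List.find?_cons_of_neg (by simp [hpy]), List.find?_cons_of_neg (by simp [hpy])]
        exact ih hys

theorem pv_pairwise_insertBy {α : Type} (bef : α → α → Bool)
    (hasymm : ∀ a b, bef a b = true → bef b a = false)
    (htrans : ∀ a b c, bef a b = true → bef b c = true → bef a c = true) (x : α) :
    ∀ (M : List α), M.Pairwise (fun a b => bef b a = false) →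
      (PySem.List.insertBy bef x M).Pairwise (fun a b => bef b a = false) := by
  intro M
  induction M with
  | nil => intro _; simp [PySem.List.insertBy]
  | cons y ys ih =>
    intro hpw
    rw [List.pairwise_cons] at hpw
    obtain ⟨hy, hys⟩ := hpw
    simp only [PySem.List.insertBy]
    by_cases hxy : bef x y = true
    · rw [if_pos hxy]
      refine List.Pairwise.cons ?_ (List.Pairwise.cons hy hys)
      intro z hz
      rcases List.mem_cons.mp hz with h | h
      · exact h ▸ hasymm x y hxy
      · cases hzx : bef z x with
        | false => rfl
        | true => exact absurd (htrans z x y hzx hxy) (by simp [hy z h])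
    · rw [if_neg hxy]
      rw [Bool.not_eq_true] at hxy
      refine List.Pairwise.cons ?_ (ih hys)
      intro z hz
      rcases (PySem.List.mem_insertBy bef x z ys).mp hz with h | h
      · exact h ▸ hxy
      · exact hy z h

-- ---- the two running-selection reference folds ----

def pvRun {α : Type} (bef : α → α → Bool) (acc : Option α) (xs : List α) : Option α :=
  xs.foldl (fun best x => match best with
    | none => some x
    | some b => if bef x b then some x else some b) acc

def pvRunP {α : Type} (p : α → Bool) (bef : α → α → Bool) (acc : Option α) (xs : List α) : Option α :=
  xs.foldl (fun best x =>
    if p x then (match best with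
      | none => some x
      | some b => if bef x b then some x else some b)
    else best) acc

theorem pv_sort_inv {α : Type} (bef : α → α → Bool) (p : α → Bool)
    (hasymm : ∀ a b, bef a b = true → bef b a = false)
    (htrans : ∀ a b c, bef a b = true → bef b c = true → bef a c = true)
    (hcompat : ∀ a b c, bef a b = true → bef c b = false → bef a c = true) :
    ∀ (xs M : List α), M.Pairwise (fun a b => bef b a = false) →
      (xs.foldl (fun acc r => PySem.List.insertBy bef r acc) M).find? p
          = pvRunP p bef (M.find? p) xs
        ∧ (xs.foldl (fun acc r => PySem.List.insertBy bef r acc) M).head?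
          = pvRun bef M.head? xs := by
  intro xs
  induction xs with
  | nil => intro M _; exact ⟨rfl, rfl⟩
  | cons x xs ih =>
    intro M hpw
    have hpw' := pv_pairwise_insertBy bef hasymm htrans x M hpw
    obtain ⟨hf, hh⟩ := ih (PySem.List.insertBy bef x M) hpw'
    constructor
    · rw [List.foldl_cons, hf, pv_find?_insertBy bef p hcompat x M hpw]
      simp only [pvRunP, List.foldl_cons]
    · rw [List.foldl_cons, hh, pv_head?_insertBy bef x M]
      simp only [pvRun, List.foldl_cons]
      congr 1
      cases M.head? with
      | none => rfl
      | some y => cases hb : bef x y <;> simp [hb]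

theorem pv_runP_some_p {α : Type} (p : α → Bool) (bef : α → α → Bool) :
    ∀ (xs : List α) (acc : Option α), (∀ a, acc = some a → p a = true) →
      ∀ m, pvRunP p bef acc xs = some m → p m = true := by
  intro xs
  induction xs with
  | nil => intro acc hacc m hm; exact hacc m hm
  | cons x xs ih =>
    intro acc hacc m hm
    cases acc with
    | none =>
      cases hpx : p x with
      | true =>
        exact ih (some x) (fun a ha => by cases ha; exact hpx) m
          (by simpa [pvRunP, hpx] using hm)
      | false =>
        exact ih none (fun a ha => by cases ha) m (by simpa [pvRunP, hpx] using hm)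
    | some b =>
      cases hpx : p x with
      | false =>
        exact ih (some b) (fun a ha => by cases ha; exact hacc b rfl) m
          (by simpa [pvRunP, hpx] using hm)
      | true =>
        cases hb : bef x b with
        | true =>
          exact ih (some x) (fun a ha => by cases ha; exact hpx) m
            (by simpa [pvRunP, hpx, hb] using hm)
        | false =>
          exact ih (some b) (fun a ha => by cases ha; exact hacc b rfl) m
            (by simpa [pvRunP, hpx, hb] using hm)

theorem pv_runP_some_of_some {α : Type} (p : α → Bool) (bef : α → α → Bool) :
    ∀ (xs : List α) (b : α), ∃ m, pvRunP p bef (some b) xs = some m := by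
  intro xs
  induction xs with
  | nil => intro b; exact ⟨b, rfl⟩
  | cons x xs ih =>
    intro b
    cases hpx : p x with
    | false =>
      obtain ⟨m, hm⟩ := ih b
      exact ⟨m, by simpa [pvRunP, hpx] using hm⟩
    | true =>
      cases hb : bef x b with
      | true =>
        obtain ⟨m, hm⟩ := ih x
        exact ⟨m, by simpa [pvRunP, hpx, hb] using hm⟩
      | false =>
        obtain ⟨m, hm⟩ := ih b
        exact ⟨m, by simpa [pvRunP, hpx, hb] using hm⟩

theorem pv_runP_none {α : Type} (p : α → Bool) (bef : α → α → Bool) :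
    ∀ (xs : List α), pvRunP p bef none xs = none → ∀ x ∈ xs, p x = false := by
  intro xs
  induction xs with
  | nil => intro _ x hx; cases hx
  | cons x xs ih =>
    intro h y hy
    cases hpx : p x with
    | true =>
      obtain ⟨m, hm⟩ := pv_runP_some_of_some p bef xs x
      have h' : pvRunP p bef (some x) xs = none := by simpa [pvRunP, hpx] using h
      rw [hm] at h'; cases h'
    | false =>
      have h' : pvRunP p bef none xs = none := by simpa [pvRunP, hpx] using h
      rcases List.mem_cons.mp hy with hEq | hmem
      · exact hEq ▸ hpx
      · exact ih h' y hmem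

theorem pv_run_mem {α : Type} (bef : α → α → Bool) :
    ∀ (xs : List α) (acc : Option α) (m : α),
      pvRun bef acc xs = some m → m ∈ xs ∨ acc = some m := by
  intro xs
  induction xs with
  | nil => intro acc m h; exact Or.inr h
  | cons x xs ih =>
    intro acc m h
    cases acc with
    | none =>
      rcases ih (some x) m (by simpa [pvRun] using h) with h' | h'
      · exact Or.inl (List.mem_cons_of_mem x h')
      · cases h'; exact Or.inl List.mem_cons_self
    | some b =>
      cases hb : bef x b with
      | true =>
        rcases ih (some x) m (by simpa [pvRun, hb] using h) with h' | h'
        · exact Or.inl (List.mem_cons_of_mem x h')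
        · cases h'; exact Or.inl List.mem_cons_self
      | false =>
        rcases ih (some b) m (by simpa [pvRun, hb] using h) with h' | h'
        · exact Or.inl (List.mem_cons_of_mem x h')
        · exact Or.inr h'

-- ---- concrete key facts (allowed set fixed) ----

def pvAllowedP (al : PySem.Set String) (r : List (String × String)) : Bool :=
  PySem.Set.contains al (PySem.Str.lower (pvGetS r "status"))

theorem pv_score_decomp (al : PySem.Set String) (r : List (String × String)) :
    pvScore al r = ((if pvAllowedP al r then 10 else 0), (pvKeyB al r).2) := rfl

theorem pv_keyB_decomp (al : PySem.Set String) (r : List (String × String)) :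
    pvKeyB al r = ((if pvAllowedP al r then 0 else 1), (pvKeyB al r).2) := rfl

theorem pv_bef_eq_befB (al : PySem.Set String) (a b : List (String × String))
    (h : pvAllowedP al a = pvAllowedP al b) :
    pvTupLt (pvScore al a) (pvScore al b) = pvTupLt (pvKeyB al a) (pvKeyB al b) := by
  rw [pv_score_decomp, pv_score_decomp, pv_keyB_decomp al a, pv_keyB_decomp al b, h]
  cases pvAllowedP al b <;> simp only [if_pos, if_neg, Bool.false_eq_true, not_false_iff] <;>
    exact pvTupLt_fst_eq _ _ _ _

theorem pv_befB_true (al : PySem.Set String) (a b : List (String × String))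
    (ha : pvAllowedP al a = true) (hb : pvAllowedP al b = false) :
    pvTupLt (pvKeyB al a) (pvKeyB al b) = true := by
  apply pvTupLt_fst
  rw [pv_keyB_decomp al a, pv_keyB_decomp al b, ha, hb]
  norm_num

theorem pv_befB_false (al : PySem.Set String) (a b : List (String × String))
    (ha : pvAllowedP al a = false) (hb : pvAllowedP al b = true) :
    pvTupLt (pvKeyB al a) (pvKeyB al b) = false := by
  apply pvTupLt_fst_ge
  rw [pv_keyB_decomp al a, pv_keyB_decomp al b, ha, hb]
  norm_num

-- ---- the combination lemma: (first allowed of the sort, else head) = one-pass best ----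

theorem pvRun_append_singleton {α : Type} (bef : α → α → Bool) (acc : Option α) (xs : List α) (x : α) :
    pvRun bef acc (xs ++ [x]) =
      match pvRun bef acc xs with
      | none => some x
      | some b => if bef x b then some x else some b := by
  simp [pvRun, List.foldl_append]

theorem pvRunP_append_singleton {α : Type} (p : α → Bool) (bef : α → α → Bool)
    (acc : Option α) (xs : List α) (x : α) :
    pvRunP p bef acc (xs ++ [x]) =
      if p x then (match pvRunP p bef acc xs with
        | none => some x
        | some b => if bef x b then some x else some b)
      else pvRunP p bef acc xs := by
  simp [pvRunP, List.foldl_append]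

theorem pv_combine (al : PySem.Set String) :
    ∀ (xs : List (List (String × String))),
      (match pvRunP (pvAllowedP al) (fun a b => pvTupLt (pvScore al a) (pvScore al b)) none xs with
        | some m => some m
        | none => pvRun (fun a b => pvTupLt (pvScore al a) (pvScore al b)) none xs)
      = pvRun (fun a b => pvTupLt (pvKeyB al a) (pvKeyB al b)) none xs := by
  intro xs
  induction xs using List.reverseRecOn with
  | nil => rfl
  | append_singleton xs x ih =>
    rw [pvRunP_append_singleton,
        pvRun_append_singleton (fun a b => pvTupLt (pvScore al a) (pvScore al b)),
        pvRun_append_singleton (fun a b => pvTupLt (pvKeyB al a) (pvKeyB al b))]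
    cases hP : pvRunP (pvAllowedP al) (fun a b => pvTupLt (pvScore al a) (pvScore al b)) none xs with
    | some m =>
      have hm : pvAllowedP al m = true :=
        pv_runP_some_p _ _ xs none (fun a ha => by cases ha) m hP
      rw [hP] at ih
      simp only [] at ih
      have hB : pvRun (fun a b => pvTupLt (pvKeyB al a) (pvKeyB al b)) none xs = some m := ih.symm
      rw [hB]
      cases hpx : pvAllowedP al x with
      | true =>
        have he := pv_bef_eq_befB al x m (hpx.trans hm.symm)
        cases hb : pvTupLt (pvKeyB al x) (pvKeyB al m) with
        | true => simp [hpx, he, hb]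
        | false => simp [hpx, he, hb]
      | false =>
        simp [hpx, pv_befB_false al x m hpx hm]
    | none =>
      have hall := pv_runP_none _ _ xs hP
      rw [hP] at ih
      simp only [] at ih
      cases hpx : pvAllowedP al x with
      | true =>
        cases hr : pvRun (fun a b => pvTupLt (pvKeyB al a) (pvKeyB al b)) none xs with
        | none => simp [hpx, hr]
        | some b =>
          have hbmem : b ∈ xs := by
            rcases pv_run_mem _ xs none b hr with h | h
            · exact h
            · cases h
          simp [hpx, hr, pv_befB_true al x b hpx (hall b hbmem)]
      | false =>
        cases hr : pvRun (fun a b => pvTupLt (pvKeyB al a) (pvKeyB al b)) none xs with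
        | none =>
          have hrS : pvRun (fun a b => pvTupLt (pvScore al a) (pvScore al b)) none xs = none :=
            ih.trans hr
          simp [hpx, hrS, hr]
        | some b =>
          have hrS : pvRun (fun a b => pvTupLt (pvScore al a) (pvScore al b)) none xs = some b :=
            ih.trans hr
          have hbmem : b ∈ xs := by
            rcases pv_run_mem _ xs none b hr with h | h
            · exact h
            · cases h
          have he := pv_bef_eq_befB al x b (by rw [hpx, hall b hbmem])
          simp [hpx, hrS, hr, he]

-- ---- B's fold with the carried key equals the reference fold ----

theorem pv_B_fold (al : PySem.Set String) :
    ∀ (xs : List (List (String × String))) (ob : Option (List (String × String))),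
      xs.foldl (fun best r =>
          let k := pvKeyB al r
          match best with
          | none => some (r, k)
          | some bp => if pvTupLt k bp.2 then some (r, k) else some bp)
        (ob.map (fun r => (r, pvKeyB al r)))
      = (pvRun (fun a b => pvTupLt (pvKeyB al a) (pvKeyB al b)) ob xs).map (fun r => (r, pvKeyB al r)) := by
  intro xs
  induction xs with
  | nil => intro ob; rfl
  | cons x xs ih =>
    intro ob
    rw [List.foldl_cons, pvRun, List.foldl_cons]
    cases ob with
    | none => exact ih (some x)
    | some b =>
      simp only [Option.map_some]
      cases hb : pvTupLt (pvKeyB al x) (pvKeyB al b) with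
      | true => rw [if_pos rfl]; exact ih (some x)
      | false => rw [if_neg (show ¬(false = true) by decide)]; exact ih (some b)

-- ===== VERDICT (by name: the statement is the Claim_ definition above) =====
theorem choose_best_release_spec : Claim_equal_choose_best_release := by
  intro releases allowed_statuses _
  unfold Spec_choose_best_release choose_best_release choose_best_release_alt
  set al : PySem.Set String := PySem.Set.ofList (allowed_statuses.map PySem.Str.lower) with hal
  simp only []
  -- B's side
  have hB := pv_B_fold al releases none
  simp only [Option.map_none] at hB
  rw [hB, Option.map_map]
  have hmap : (Prod.fst ∘ fun r : List (String × String) => (r, pvKeyB al r)) = id := rfl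
  rw [hmap, Option.map_id]
  -- A's side
  by_cases hnil : releases = []
  · subst hnil; rfl
  · rw [if_neg hnil]
    have hasymm : ∀ a b : List (String × String),
        pvTupLt (pvScore al a) (pvScore al b) = true → pvTupLt (pvScore al b) (pvScore al a) = false :=
      fun a b h => pvTupLt_asymm h
    have htrans : ∀ a b c : List (String × String),
        pvTupLt (pvScore al a) (pvScore al b) = true → pvTupLt (pvScore al b) (pvScore al c) = true →
        pvTupLt (pvScore al a) (pvScore al c) = true :=
      fun a b c h1 h2 => pvTupLt_trans h1 h2
    have hcompat : ∀ a b c : List (String × String),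
        pvTupLt (pvScore al a) (pvScore al b) = true → pvTupLt (pvScore al c) (pvScore al b) = false →
        pvTupLt (pvScore al a) (pvScore al c) = true :=
      fun a b c h1 h2 => pvTupLt_compat h1 h2
    obtain ⟨hf, hh⟩ := pv_sort_inv (fun a b => pvTupLt (pvScore al a) (pvScore al b)) (pvAllowedP al)
      hasymm htrans hcompat releases [] List.Pairwise.nil
    rw [List.find?_nil] at hf
    rw [List.head?_nil] at hh
    show (match (releases.foldl (fun acc r =>
        PySem.List.insertBy (fun a b => pvTupLt (pvScore al a) (pvScore al b)) r acc) []).find? (pvAllowedP al) with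
      | some r => some r
      | none => (releases.foldl (fun acc r =>
          PySem.List.insertBy (fun a b => pvTupLt (pvScore al a) (pvScore al b)) r acc) []).head?) = _
    rw [hf, hh]
    exact pv_combine al releases
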